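-- pv_equiv track=rewrite | github.com/Azamat1909/fsp-r-3-22 | 8_isakov_azamat/134.py | def_all_subscriptions
-- ===== SOURCE A (Python) =====
-- def def_all_subscriptions(list1: list):
--     ls = []
--     last_ls1 = []
--
--     if len(list1) == 0:
--         return []
--     else:
--         for num1 in range(len(list1)):
--             for num2 in range(len(list1)):
--                 ls.append(list1[num1: num2 + 1])
--
--     c = 1
--     last_ls1.append([])
--     while c < len(ls):
--         for n in ls:
--             if len(n) == c:
--                 last_ls1.append(n)
--             else:
--                 continue
--         c += 1
--
--     return last_ls1
-- ===== SOURCE B (Python) =====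
-- def def_all_subscriptions(list1: list):
--     # One pass per length: emit slices of length c directly, c = 1..n.
--     if not list1:
--         return []
--     n = len(list1)
--     out = [[]]
--     for c in range(1, n + 1):
--         for a in range(n - c + 1):
--             out.append(list1[a:a + c])
--     return out
-- ===== Notes on version B (the rewrite author's own statement) =====
-- stated objective: faster
-- what changed: Instead of materializing all n^2 slices and rescanning that list once per candidate length (c up to n^2), B emits the slices of each length c=1..n directly by their start index, so no slice list is built and no filtering passes are made.
-- intended difference: On single-element lists A returns [[]] (its while loop 'c < len(ls)' never runs since len(ls)=1), dropping the one-element sublist; B returns [[], [x]], which includes all contiguous sublists as intended. — e.g. on def_all_subscriptions([1]): A returns [[]], B returns [[], [1]]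
import Mathlib
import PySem

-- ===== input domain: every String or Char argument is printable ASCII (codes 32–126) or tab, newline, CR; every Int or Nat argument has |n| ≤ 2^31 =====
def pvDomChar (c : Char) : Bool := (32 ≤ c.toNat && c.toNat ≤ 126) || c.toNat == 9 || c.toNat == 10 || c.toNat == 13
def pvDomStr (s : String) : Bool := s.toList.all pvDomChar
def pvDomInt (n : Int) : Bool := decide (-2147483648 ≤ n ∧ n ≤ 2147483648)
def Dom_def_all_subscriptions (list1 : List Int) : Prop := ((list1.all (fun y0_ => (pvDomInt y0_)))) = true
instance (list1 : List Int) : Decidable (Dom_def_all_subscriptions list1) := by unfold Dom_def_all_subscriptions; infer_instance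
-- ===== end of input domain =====

-- B emits the slices of each length c = 1..n directly by start index, instead of A's
-- building all n^2 slices and rescanning that list once per candidate length c < n^2 (faster).


-- ===== PORT A =====
-- transliteration of A: build ls = all list1[num1:num2+1]; then the while loop
-- 'c = 1; while c < len(ls): … ; c += 1' appends, per value of c, every element of ls
-- whose length is c; the counter is deterministic, so the while loop is folded over
-- range(1, len(ls)), exactly the values c takes
def def_all_subscriptions (list1 : List Int) : List (List Int) :=
  if (list1.length : Int) = 0 then []
  else
    let ls : List (List Int) :=
      (PySem.List.pyRange 0 (list1.length : Int) 1).foldl (fun acc num1 =>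
        (PySem.List.pyRange 0 (list1.length : Int) 1).foldl (fun acc2 num2 =>
          acc2 ++ [PySem.List.slice list1 (some num1) (some (num2 + 1))]) acc) []
    (PySem.List.pyRange 1 (ls.length : Int) 1).foldl (fun acc c =>
      ls.foldl (fun acc2 n => if (n.length : Int) = c then acc2 ++ [n] else acc2) acc)
      [[]]

-- ===== PORT B =====
def def_all_subscriptions_alt (list1 : List Int) : List (List Int) :=
  if list1 = [] then []
  else
    (PySem.List.pyRange 1 ((list1.length : Int) + 1) 1).foldl (fun acc c =>
      (PySem.List.pyRange 0 ((list1.length : Int) - c + 1) 1).foldl (fun acc2 a =>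
        acc2 ++ [PySem.List.slice list1 (some a) (some (a + c))]) acc) [[]]

-- ===== PRECONDITION & SPEC =====
-- On single-element lists A's while loop 'c < len(ls)' never runs (len(ls) = 1), so A
-- returns [[]] and drops the one-element sublist; B returns [[], [x]], the intended value.
def D_def_all_subscriptions (list1 : List Int) : Prop := list1.length = 1
instance (list1 : List Int) : Decidable (D_def_all_subscriptions list1) := by unfold D_def_all_subscriptions; infer_instance
def Spec_def_all_subscriptions (list1 : List Int) (out : List (List Int)) : Prop := ¬ D_def_all_subscriptions list1 → out = def_all_subscriptions_alt list1
instance (list1 : List Int) (out : List (List Int)) : Decidable (Spec_def_all_subscriptions list1 out) := by unfold Spec_def_all_subscriptions; infer_instance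
def pvDiffWitness_def_all_subscriptions : List Int := [1]
def pvDiffWitnessOut_def_all_subscriptions : (List (List Int)) × (List (List Int)) := ([[]], [[], [1]])

-- ===== CLAIM (what is proved, stated in full; the proofs are below) =====
def Claim_unchanged_def_all_subscriptions : Prop := ∀ (list1 : List Int), Dom_def_all_subscriptions list1 → Spec_def_all_subscriptions list1 (def_all_subscriptions list1)
def Claim_changed_def_all_subscriptions : Prop := Dom_def_all_subscriptions (pvDiffWitness_def_all_subscriptions) ∧ D_def_all_subscriptions (pvDiffWitness_def_all_subscriptions) ∧ def_all_subscriptions (pvDiffWitness_def_all_subscriptions) = pvDiffWitnessOut_def_all_subscriptions.1 ∧ def_all_subscriptions_alt (pvDiffWitness_def_all_subscriptions) = pvDiffWitnessOut_def_all_subscriptions.2 ∧ pvDiffWitnessOut_def_all_subscriptions.1 ≠ pvDiffWitnessOut_def_all_subscriptions.2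
def Claim_exact_def_all_subscriptions : Prop := ∀ (list1 : List Int), Dom_def_all_subscriptions list1 → D_def_all_subscriptions list1 → def_all_subscriptions list1 ≠ def_all_subscriptions_alt list1

-- ===== LEMMAS AND PROOFS =====

theorem pv_filter_range_eq (n m : Nat) :
    (List.range n).filter (fun j => decide (j = m)) = if m < n then [m] else [] := by
  induction n with
  | zero => simp
  | succ n ih =>
    rw [List.range_succ, List.filter_append, ih]
    by_cases h : m < n
    · simp [h, Nat.lt_succ_of_lt h, Nat.ne_of_lt' h]
    · by_cases h2 : m = n
      · simp [h2]
      · have h3 : ¬ m < n + 1 := by omega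
        simp [h, h3, Ne.symm h2]

theorem pv_flatMap_if_singleton {α β : Type} (p : α → Bool) (f : α → β) (l : List α) :
    l.flatMap (fun x => if p x then [f x] else []) = (l.filter p).map f := by
  induction l with
  | nil => simp
  | cons a t ih => by_cases h : p a <;> simp [List.flatMap_cons, h, ih]

theorem pv_filter_range_lt (n m : Nat) :
    (List.range n).filter (fun i => decide (i < m)) = List.range (min m n) := by
  induction n with
  | zero => simp
  | succ n ih =>
    rw [List.range_succ, List.filter_append, ih]
    by_cases h : n < m
    · have h1 : min m n = n := by omega
      have h2 : min m (n+1) = n+1 := by omega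
      simp [h, h1, List.range_succ]
    · have h1 : min m n = min m (n+1) := by omega
      simp [h, ← h1]

-- the slices of length k+1, in start order (the common normal form of both ports)
def pvF (l : List Int) (k : Nat) : List (List Int) :=
  (List.range (l.length - k)).map (fun a => (l.drop a).take (k+1))

-- filtering A's slice list for length 1+k yields exactly the slices of that length, in start order
theorem pv_crux (l : List Int) (k : Nat) :
    (((List.range l.length).flatMap (fun i =>
        (List.range l.length).map (fun j => (l.drop i).take (j+1-i)))).filter
      (fun nn => decide ((nn.length : Int) = 1 + (k : Int))))
    = pvF l k := by
  rw [List.filter_flatMap]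
  have step : ∀ i ∈ List.range l.length,
      (((List.range l.length).map (fun j => (l.drop i).take (j+1-i))).filter
        (fun nn => decide ((nn.length : Int) = 1 + (k : Int))))
      = if decide (i + k < l.length) then [(l.drop i).take (k+1)] else [] := by
    intro i hi
    rw [List.mem_range] at hi
    rw [List.filter_map]
    have hcongr : ∀ j ∈ List.range l.length,
        ((fun nn => decide ((nn.length : Int) = 1 + (k : Int))) ∘ (fun j => (l.drop i).take (j+1-i))) j
        = decide (j = i + k ∧ i + k < l.length) := by
      intro j hj
      rw [List.mem_range] at hj
      simp only [Function.comp, List.length_take, List.length_drop, decide_eq_decide]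
      omega
    rw [List.filter_congr hcongr]
    by_cases h : i + k < l.length
    · have he : (fun j => decide (j = i + k ∧ i + k < l.length)) = (fun j => decide (j = i + k)) := by
        funext j; simp [h]
      rw [he, pv_filter_range_eq]
      simp only [if_pos h, List.map_cons, List.map_nil, decide_eq_true_eq]
      have h4 : i + k + 1 - i = k + 1 := by omega
      rw [h4]
    · simp [h]
  rw [List.flatMap_congr step, pv_flatMap_if_singleton]
  have h5 : (fun i => decide (i + k < l.length)) = (fun i => decide (i < l.length - k)) := by
    funext i; simp only [decide_eq_decide]; omega
  rw [h5, pv_filter_range_lt]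
  have h6 : min (l.length - k) l.length = l.length - k := by omega
  rw [h6, pvF]

theorem pv_B_norm (l : List Int) (h : l ≠ []) :
    def_all_subscriptions_alt l = [[]] ++ (List.range l.length).flatMap (pvF l) := by
  rw [def_all_subscriptions_alt, if_neg h]
  simp only [PySem.List.foldl_append_singleton_eq_map, PySem.List.foldl_append_eq_flatMap]
  rw [PySem.List.pyRange_one 1 ((l.length : Int) + 1)]
  have h1 : ((l.length : Int) + 1 - 1).toNat = l.length := by omega
  rw [h1, List.flatMap_map]
  congr 1
  apply List.flatMap_congr
  intro k hk
  rw [List.mem_range] at hk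
  have h2 : (l.length : Int) - (1 + (k : Int)) + 1 = ((l.length - k : Nat) : Int) := by omega
  rw [h2, PySem.List.pyRange_zero_natCast, List.map_map]
  rw [pvF]
  apply List.map_congr_left
  intro a ha
  simp only [Function.comp]
  have h3 : ((a : Int) + (1 + (k : Int))) = ((a : Int) + ((k + 1 : Nat) : Int)) := by push_cast; ring
  rw [h3, PySem.List.slice_natCast_add]

theorem pv_ls_norm (l : List Int) :
    (PySem.List.pyRange 0 (l.length : Int) 1).flatMap (fun num1 =>
      (PySem.List.pyRange 0 (l.length : Int) 1).map (fun num2 =>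
        PySem.List.slice l (some num1) (some (num2 + 1))))
    = (List.range l.length).flatMap (fun i =>
        (List.range l.length).map (fun j => (l.drop i).take (j+1-i))) := by
  rw [PySem.List.pyRange_zero_natCast, List.flatMap_map]
  apply List.flatMap_congr
  intro i _
  rw [List.map_map]
  apply List.map_congr_left
  intro j _
  simp only [Function.comp]
  have h1 : ((j : Int) + 1) = ((j + 1 : Nat) : Int) := by push_cast; ring
  rw [h1, PySem.List.slice_natCast]

theorem pv_A_norm (l : List Int) (h : l ≠ []) :
    def_all_subscriptions l
    = [[]] ++ (List.range (l.length * l.length - 1)).flatMap (pvF l) := by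
  have hlen : ¬ ((l.length : Int) = 0) := by
    simp [List.length_eq_zero_iff, h]
  rw [def_all_subscriptions, if_neg hlen]
  simp only [PySem.List.foldl_append_singleton_eq_map, PySem.List.foldl_append_eq_flatMap,
    PySem.List.foldl_append_ite_eq_filter, List.nil_append]
  rw [pv_ls_norm]
  have hls : ((List.range l.length).flatMap (fun i =>
      (List.range l.length).map (fun j => (l.drop i).take (j+1-i)))).length
      = l.length * l.length := by
    rw [List.length_flatMap]
    have hmap : (List.map (fun i => ((List.range l.length).map (fun j => (l.drop i).take (j+1-i))).length) (List.range l.length))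
        = List.map (fun _ => l.length) (List.range l.length) := by
      apply List.map_congr_left; intro i _; simp
    rw [hmap]
    simp [List.map_const']
  rw [hls]
  rw [PySem.List.pyRange_one 1 ((l.length * l.length : Nat) : Int)]
  have h1 : (((l.length * l.length : Nat) : Int) - 1).toNat = l.length * l.length - 1 := by omega
  rw [h1, List.flatMap_map]
  congr 1
  apply List.flatMap_congr
  intro k _
  exact pv_crux l k

theorem pv_main (l : List Int) (h2 : l.length ≠ 1) :
    def_all_subscriptions l = def_all_subscriptions_alt l := by
  by_cases h0 : l = []
  · subst h0; decide
  · rw [pv_A_norm l h0, pv_B_norm l h0]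
    have hn : 2 ≤ l.length := by
      rcases Nat.lt_or_ge l.length 2 with h | h
      · interval_cases hl : l.length <;> simp_all
      · exact h
    have hsplit : l.length * l.length - 1 = l.length + (l.length * l.length - 1 - l.length) := by
      have := Nat.mul_le_mul hn (Nat.le_refl l.length)
      omega
    rw [hsplit, List.range_add, List.flatMap_append]
    have hnil : (List.map (fun x => l.length + x) (List.range (l.length * l.length - 1 - l.length))).flatMap (pvF l) = [] := by
      rw [List.flatMap_map]
      apply List.flatMap_eq_nil_iff.mpr
      intro x _
      simp only [pvF]
      have hz : l.length - (l.length + x) = 0 := by omega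
      simp [hz]
    rw [hnil, List.append_nil]

-- ===== VERDICT (by name: the statements are the Claim_ definitions above) =====
theorem def_all_subscriptions_spec : Claim_unchanged_def_all_subscriptions := by
  intro list1 _ hD
  exact pv_main list1 hD
theorem def_all_subscriptions_changed : Claim_changed_def_all_subscriptions := by
  unfold Claim_changed_def_all_subscriptions; decide
theorem def_all_subscriptions_tight : Claim_exact_def_all_subscriptions := by
  intro list1 _ hD
  have h0 : list1 ≠ [] := by intro h; rw [h] at hD; simp [D_def_all_subscriptions] at hD
  rw [pv_A_norm list1 h0, pv_B_norm list1 h0]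
  have h1 : list1.length = 1 := hD
  rw [h1]
  simp [pvF, h1]
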